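-- pv_equiv track=rewrite | github.com/johns30061/Quine-McCluskey | tabulation.py | getminimal
-- ===== SOURCE A (Python) =====
-- def getcount(mainList):
-- 	count =0
-- 	for string in [x[0] for x in mainList]:
-- 		for i in string:
-- 			if i=='0' or i=='1':
-- 				count+=1
--
-- 	return count
--
-- def getminimal(selected_implicants):
-- 	minimal_implicants=[]
-- 	minimum=999999
-- 	for i in selected_implicants:
-- 		if getcount(i)<minimum:
-- 			minimum=getcount(i)
--
-- 	for i in selected_implicants:
-- 		if getcount(i)==minimum:
-- 			minimal_implicants.append(i)
--
-- 	return minimal_implicants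
-- ===== SOURCE B (Python) =====
-- def getcount(mainList):
-- 	count =0
-- 	for string in [x[0] for x in mainList]:
-- 		for i in string:
-- 			if i=='0' or i=='1':
-- 				count+=1
--
-- 	return count
--
-- def getminimal(selected_implicants):
-- 	# One pass: compute each implicant's count once, reset the collection when a
-- 	# strictly smaller count appears, append on ties.
-- 	minimum = 999999
-- 	minimal_implicants = []
-- 	for i in selected_implicants:
-- 		c = getcount(i)
-- 		if c < minimum:
-- 			minimum = c
-- 			minimal_implicants = [i]
-- 		elif c == minimum:
-- 			minimal_implicants.append(i)
-- 	return minimal_implicants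
-- ===== Notes on version B (the rewrite author's own statement) =====
-- stated objective: alternative
-- what changed: Replaces A's two full passes (each recomputing getcount, up to three times per element) with a single argmin-all pass that computes getcount once per element, resetting the collected list on a strictly smaller count and appending on ties.
import Mathlib
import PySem

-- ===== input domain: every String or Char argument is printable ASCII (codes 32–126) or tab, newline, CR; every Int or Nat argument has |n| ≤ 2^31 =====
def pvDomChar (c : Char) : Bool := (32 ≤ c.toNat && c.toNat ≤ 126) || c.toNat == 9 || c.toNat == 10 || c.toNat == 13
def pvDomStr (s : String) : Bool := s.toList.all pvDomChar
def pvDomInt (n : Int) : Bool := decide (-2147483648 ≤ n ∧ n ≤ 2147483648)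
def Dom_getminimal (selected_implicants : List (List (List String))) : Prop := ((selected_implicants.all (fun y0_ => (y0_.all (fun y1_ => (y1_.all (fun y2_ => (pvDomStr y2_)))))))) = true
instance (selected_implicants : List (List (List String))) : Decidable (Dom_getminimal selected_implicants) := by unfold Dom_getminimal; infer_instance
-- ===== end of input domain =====

-- B replaces A's two passes (which recompute getcount) with a single argmin-all pass
-- that computes getcount once per element (alternative decomposition, same asymptotic cost).

-- ===== PORT A =====
-- shared module helper getcount (identical in Source A and Source B); x[0] is exact under
-- Pre_getminimal (no empty inner list, so Python's x[0] never raises)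
def getcount (mainList : List (List String)) : Int :=
  (mainList.map (fun x => ((PySem.List.pyGet? x 0).getD "").toList)).foldl
    (fun count s => s.foldl (fun c i => if i = '0' ∨ i = '1' then c + 1 else c) count) 0

def getminimal (selected_implicants : List (List (List String))) : List (List (List String)) :=
  let minimum : Int :=
    selected_implicants.foldl (fun m i => if getcount i < m then getcount i else m) 999999
  selected_implicants.foldl
    (fun acc i => if getcount i = minimum then acc ++ [i] else acc) []

-- ===== PORT B =====
def getminimal_alt (selected_implicants : List (List (List String))) : List (List (List String)) :=
  (selected_implicants.foldl
    (fun (st : Int × List (List (List String))) i =>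
      let c := getcount i
      if c < st.1 then (c, [i])
      else if c = st.1 then (st.1, st.2 ++ [i])
      else st)
    (999999, [])).2

-- ===== PRECONDITION & SPEC =====
-- Pre_ excludes exactly the inputs where Python's getcount raises IndexError on x[0]:
-- some implicant contains an empty inner list (B raises identically there).
def Pre_getminimal (selected_implicants : List (List (List String))) : Prop :=
  ∀ i ∈ selected_implicants, ∀ x ∈ i, x ≠ []
instance (selected_implicants : List (List (List String))) : Decidable (Pre_getminimal selected_implicants) := by unfold Pre_getminimal; infer_instance

def pvWitness_getminimal : List (List (List String)) := [[["01-", "a"]], [["1"]]]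

def Spec_getminimal (selected_implicants : List (List (List String))) (out : List (List (List String))) : Prop := out = getminimal_alt selected_implicants
instance (selected_implicants : List (List (List String))) (out : List (List (List String))) : Decidable (Spec_getminimal selected_implicants out) := by unfold Spec_getminimal; infer_instance

-- ===== CLAIM (what is proved, stated in full; the proofs are below) =====
def Claim_equal_getminimal : Prop := ∀ (selected_implicants : List (List (List String))), Dom_getminimal selected_implicants → Pre_getminimal selected_implicants → Spec_getminimal selected_implicants (getminimal selected_implicants)

-- ===== LEMMAS AND PROOFS =====

-- A's first pass, with arbitrary initial minimum
def minA (l : List (List (List String))) (m : Int) : Int :=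
  l.foldl (fun m i => if getcount i < m then getcount i else m) m

theorem minA_le (l : List (List (List String))) (m : Int) : minA l m ≤ m := by
  induction l generalizing m with
  | nil => simp [minA]
  | cons h t ih =>
    simp only [minA, List.foldl_cons]
    split_ifs with hc
    · exact le_of_lt (lt_of_le_of_lt (ih _) hc)
    · exact ih m

-- B's fold characterised by A's minimum and a filter over the whole list
theorem bfold_spec (l : List (List (List String))) (m : Int) (acc : List (List (List String))) :
    (l.foldl
      (fun (st : Int × List (List (List String))) i =>
        let c := getcount i
        if c < st.1 then (c, [i])
        else if c = st.1 then (st.1, st.2 ++ [i])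
        else st)
      (m, acc)) =
    (minA l m,
      (if minA l m = m then acc else []) ++ l.filter (fun i => getcount i = minA l m)) := by
  induction l generalizing m acc with
  | nil => simp [minA]
  | cons h t ih =>
    have hmin : ∀ m' : Int, minA (h :: t) m' =
        minA t (if getcount h < m' then getcount h else m') := by
      intro m'; simp [minA, List.foldl_cons]
    rw [List.foldl_cons]
    by_cases h1 : getcount h < m
    · simp only [h1, if_pos, hmin m, ih]
      have hle : minA t (getcount h) ≤ getcount h := minA_le _ _
      have hne : ¬ (minA t (getcount h) = m) := by omega
      simp only [hne, List.filter_cons]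
      by_cases h2 : minA t (getcount h) = getcount h
      · simp [h2]
      · have : ¬ (getcount h = minA t (getcount h)) := fun e => h2 e.symm
        simp [this, h2]
    · by_cases h2 : getcount h = m
      · simp only [h2, if_pos, ih]
        simp only [hmin m, List.filter_cons, h2]
        by_cases h3 : minA t m = m
        · simp [h3]
        · have : ¬ (m = minA t m) := fun e => h3 e.symm
          simp [this, h3]
      · simp only [h1, h2, ih]
        simp only [hmin m, h1, List.filter_cons]
        have hle : minA t m ≤ m := minA_le _ _
        have : ¬ (getcount h = minA t m) := by omega
        simp [this]

-- ===== VERDICT (by name: the statement is the Claim_ definition above) =====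
theorem getminimal_spec : Claim_equal_getminimal := by
  intro l _ _
  show getminimal l = getminimal_alt l
  unfold getminimal getminimal_alt
  rw [bfold_spec]
  show List.foldl _ [] l = _
  rw [PySem.List.foldl_append_ite_eq_filter]
  split_ifs <;> rfl
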